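-- pv_equiv track=rewrite | github.com/cognitedata/library | modules/accelerators/contextualization/cdf_key_extraction_aliasing/functions/cdf_fn_common/extraction_input_hash.py | _dedupe_wanted_fields
-- ===== SOURCE A (Python) =====
-- from typing import Any, Dict, List, Mapping, Optional, Set, Tuple
--
-- def _dedupe_wanted_fields(
--     wanted: List[Tuple[str, bool, List[str]]],
-- ) -> List[Tuple[str, bool, List[str]]]:
--     """One entry per field_name; ``required`` is True if any contributing row required it."""
--     acc: Dict[str, Tuple[bool, List[str]]] = {}
--     for fn, req, pre in wanted:
--         if not fn:
--             continue
--         if fn not in acc: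
--             acc[fn] = (req, pre)
--         else:
--             r0, p0 = acc[fn]
--             acc[fn] = (r0 or req, pre if req else p0)
--     return [(k, acc[k][0], acc[k][1]) for k in sorted(acc.keys())]
-- ===== SOURCE B (Python) =====
-- def _dedupe_wanted_fields(wanted):
--     """One entry per field_name; ``required`` is True if any contributing row required it."""
--     entries = [e for e in wanted if e[0]]
--     names = sorted({fn for fn, _, _ in entries})
--     result = []
--     for name in names:
--         grp = [(req, pre) for fn, req, pre in entries if fn == name]
--         required = any(req for req, _ in grp)
--         pre = next((p for r, p in reversed(grp) if r), grp[0][1])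
--         result.append((name, required, pre))
--     return result
-- ===== Notes on version B (the rewrite author's own statement) =====
-- stated objective: alternative
-- what changed: Replaces the incremental dict fold (merge flags/pre per entry, then sort keys) with a dict-free decomposition: sort the distinct non-empty names once, then for each name scan its group directly, taking required = any(req) and pre = the pre of the last required entry (first entry's pre if none).
import Mathlib
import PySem

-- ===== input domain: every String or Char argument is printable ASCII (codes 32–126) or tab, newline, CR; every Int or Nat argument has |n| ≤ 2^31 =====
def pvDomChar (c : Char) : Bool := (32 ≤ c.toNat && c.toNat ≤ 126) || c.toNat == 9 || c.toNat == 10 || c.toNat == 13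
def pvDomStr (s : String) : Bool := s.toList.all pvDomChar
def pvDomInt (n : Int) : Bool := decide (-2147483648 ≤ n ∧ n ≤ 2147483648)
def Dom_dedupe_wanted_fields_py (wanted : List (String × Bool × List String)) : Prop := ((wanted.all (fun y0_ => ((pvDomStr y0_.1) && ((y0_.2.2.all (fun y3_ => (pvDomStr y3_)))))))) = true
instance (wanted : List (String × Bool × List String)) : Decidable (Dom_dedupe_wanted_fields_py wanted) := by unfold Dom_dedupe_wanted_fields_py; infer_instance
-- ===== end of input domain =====

-- B replaces A's incremental dict fold + final key sort with a dict-free decomposition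
-- (sorted distinct names, then a direct per-name group scan); objective: alternative, not faster.

-- ===== PORT A =====
-- the loop body of A: skip empty names, first occurrence inserts, later ones merge
def pvStepA (acc : PySem.Dict String (Bool × List String)) (e : String × Bool × List String) :
    PySem.Dict String (Bool × List String) :=
  if e.1 = "" then acc
  else if acc.contains e.1 = false then acc.insert e.1 (e.2.1, e.2.2)
  else
    let old := acc.getD e.1 (false, [])
    acc.insert e.1 (old.1 || e.2.1, if e.2.1 then e.2.2 else old.2)

def dedupe_wanted_fields_py (wanted : List (String × Bool × List String)) : List (String × Bool × List String) :=
  let acc := wanted.foldl pvStepA PySem.Dict.empty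
  (PySem.List.sorted acc.keys (fun k => k) false).map
    (fun k => (k, (acc.getD k (false, [])).1, (acc.getD k (false, [])).2))

-- ===== PORT B =====
-- pre = next((p for r, p in reversed(grp) if r), grp[0][1])
def pvGroupPre (grp : List (Bool × List String)) : List String :=
  match grp.reverse.find? (fun g => g.1) with
  | some g => g.2
  | none => (grp.headD (false, [])).2

def dedupe_wanted_fields_py_alt (wanted : List (String × Bool × List String)) : List (String × Bool × List String) :=
  let entries := wanted.filter (fun e => !(e.1 == ""))
  let names := PySem.List.sorted (PySem.Set.ofList (entries.map (fun e => e.1))) (fun k => k) false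
  names.map (fun name =>
    let grp := (entries.filter (fun e => e.1 == name)).map (fun e => e.2)
    (name, grp.any (fun g => g.1), pvGroupPre grp))

-- ===== PRECONDITION & SPEC =====
def Spec_dedupe_wanted_fields_py (wanted : List (String × Bool × List String)) (out : List (String × Bool × List String)) : Prop := out = dedupe_wanted_fields_py_alt wanted
instance (wanted : List (String × Bool × List String)) (out : List (String × Bool × List String)) : Decidable (Spec_dedupe_wanted_fields_py wanted out) := by unfold Spec_dedupe_wanted_fields_py; infer_instance

-- ===== CLAIM (what is proved, stated in full; the proofs are below) =====
def Claim_equal_dedupe_wanted_fields_py : Prop := ∀ (wanted : List (String × Bool × List String)), Dom_dedupe_wanted_fields_py wanted → Spec_dedupe_wanted_fields_py wanted (dedupe_wanted_fields_py wanted)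

-- ===== LEMMAS AND PROOFS =====

-- the per-key reduction A's dict performs on the stream of a key's (required, pre) pairs
def pvRed : Option (Bool × List String) → List (Bool × List String) → Option (Bool × List String)
  | o, [] => o
  | none, g :: t => pvRed (some g) t
  | some a, g :: t => pvRed (some (a.1 || g.1, if g.1 then g.2 else a.2)) t

-- pre of the last required pair of t, else the fallback a
def pvLastPre (a : List String) (t : List (Bool × List String)) : List String :=
  match t.reverse.find? (fun g => g.1) with
  | some g => g.2
  | none => a

lemma pvLastPre_cons (a : List String) (g : Bool × List String) (t : List (Bool × List String)) :
    pvLastPre a (g :: t) = pvLastPre (if g.1 then g.2 else a) t := by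
  unfold pvLastPre
  simp only [List.reverse_cons, List.find?_append]
  cases h : t.reverse.find? (fun g => g.1) with
  | some u => simp
  | none => cases hg : g.1 <;> simp [List.find?, hg]

lemma pv_red_some (t : List (Bool × List String)) :
    ∀ a, pvRed (some a) t = some (a.1 || t.any (fun g => g.1), pvLastPre a.2 t) := by
  induction t with
  | nil => intro a; simp [pvRed, pvLastPre]
  | cons g t ih =>
    intro a
    show pvRed (some (a.1 || g.1, if g.1 then g.2 else a.2)) t = _
    rw [ih, pvLastPre_cons]
    simp [Bool.or_assoc]

lemma pv_get?_foldl (l : List (String × Bool × List String)) (k : String) (hk : k ≠ "") :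
    ∀ d, (l.foldl pvStepA d).get? k
      = pvRed (d.get? k) ((l.filter (fun e => e.1 == k)).map (fun e => e.2)) := by
  induction l with
  | nil => intro d; rfl
  | cons e t ih =>
    intro d
    rw [List.foldl_cons, List.filter_cons, ih]
    by_cases h2 : e.1 = k
    · have h1 : ¬ e.1 = "" := h2 ▸ hk
      rw [if_pos (by simp [h2]), List.map_cons]
      subst h2
      have hc := PySem.Dict.contains_eq_isSome_get? d e.1
      cases hg : d.get? e.1 with
      | none =>
        have hs : pvStepA d e = d.insert e.1 (e.2.1, e.2.2) := by
          unfold pvStepA; rw [if_neg h1, if_pos (by rw [hc, hg]; rfl)]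
        rw [hs, PySem.Dict.get?_insert_self]
        rfl
      | some a =>
        have hs : pvStepA d e
            = d.insert e.1 (a.1 || e.2.1, if e.2.1 then e.2.2 else a.2) := by
          unfold pvStepA
          rw [if_neg h1, if_neg (by rw [hc, hg]; simp), PySem.Dict.getD_eq_get?_getD, hg]
          rfl
        rw [hs, PySem.Dict.get?_insert_self]
        rfl
    · have hne : (e.1 == k) = false := by simpa using h2
      rw [if_neg (by simp [hne])]
      unfold pvStepA
      split_ifs <;>
        first
          | rfl
          | rw [PySem.Dict.get?_insert_of_ne _ _ (fun h => h2 h.symm)]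

lemma pv_nodup_keys_foldl (l : List (String × Bool × List String)) :
    ∀ d : PySem.Dict String (Bool × List String), d.keys.Nodup → (l.foldl pvStepA d).keys.Nodup := by
  induction l with
  | nil => intro d hd; exact hd
  | cons e t ih =>
    intro d hd
    apply ih
    unfold pvStepA
    split_ifs <;> first | exact hd | exact PySem.Dict.nodup_keys_insert _ _ _ hd

lemma pv_mem_keys_foldl (l : List (String × Bool × List String)) (k : String) :
    ∀ d, k ∈ (l.foldl pvStepA d).keys ↔ k ∈ d.keys ∨ (k ≠ "" ∧ ∃ e ∈ l, e.1 = k) := by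
  induction l with
  | nil => intro d; simp
  | cons e t ih =>
    intro d
    have hstep : k ∈ (pvStepA d e).keys ↔ (¬ e.1 = "" ∧ k = e.1) ∨ k ∈ d.keys := by
      simp only [pvStepA]
      split_ifs with ha hb <;> simp [PySem.Dict.mem_keys_insert, ha]
    rw [List.foldl_cons, ih, hstep]
    simp only [List.mem_cons, exists_eq_or_imp]
    have h1 : k = e.1 ↔ e.1 = k := eq_comm
    have h2 : e.1 = k → ¬ e.1 = "" → k ≠ "" := by rintro rfl h; exact h
    have h3 : e.1 = k → k ≠ "" → ¬ e.1 = "" := by rintro rfl h; exact h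
    tauto

-- ===== VERDICT (by name: the statement is the Claim_ definition above) =====
theorem dedupe_wanted_fields_py_spec : Claim_equal_dedupe_wanted_fields_py := by
  intro wanted _hdom
  show dedupe_wanted_fields_py wanted = dedupe_wanted_fields_py_alt wanted
  simp only [dedupe_wanted_fields_py, dedupe_wanted_fields_py_alt]
  have hmem : ∀ k, k ∈ (wanted.foldl pvStepA PySem.Dict.empty).keys
      ↔ k ∈ PySem.Set.ofList ((wanted.filter (fun e => !(e.1 == ""))).map (fun e => e.1)) := by
    intro k
    rw [pv_mem_keys_foldl, PySem.Set.mem_ofList]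
    simp only [PySem.Dict.keys_empty, List.not_mem_nil, false_or, List.mem_map, List.mem_filter]
    constructor
    · rintro ⟨hk, e, he, rfl⟩
      exact ⟨e, ⟨he, by simpa using hk⟩, rfl⟩
    · rintro ⟨e, ⟨he, hne⟩, rfl⟩
      exact ⟨by simpa using hne, e, he, rfl⟩
  have hperm : (wanted.foldl pvStepA PySem.Dict.empty).keys.Perm
      (PySem.Set.ofList ((wanted.filter (fun e => !(e.1 == ""))).map (fun e => e.1))) :=
    (List.perm_ext_iff_of_nodup
      (pv_nodup_keys_foldl wanted PySem.Dict.empty PySem.Dict.nodup_keys_empty)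
      (PySem.Set.nodup_ofList _)).mpr hmem
  rw [PySem.List.sorted_eq_sorted_of_perm _ _ _ (fun a b h => h) hperm]
  apply List.map_congr_left
  intro k hk
  have hkmem : k ∈ (wanted.filter (fun e => !(e.1 == ""))).map (fun e => e.1) :=
    (PySem.Set.mem_ofList _ _).mp ((PySem.List.mem_sorted _ _ _ _).mp hk)
  have hkne : k ≠ "" := by
    rcases List.mem_map.mp hkmem with ⟨e, he, rfl⟩
    simpa using (List.mem_filter.mp he).2
  have hgrp : (wanted.filter (fun e => !(e.1 == ""))).filter (fun e => e.1 == k)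
      = wanted.filter (fun e => e.1 == k) := by
    rw [List.filter_filter]
    apply List.filter_congr
    intro e _
    cases h : (e.1 == k) with
    | false => simp
    | true =>
      have he1 : e.1 = k := eq_of_beq h
      simp [he1, hkne]
  obtain ⟨g, t, hgt⟩ : ∃ g t, (wanted.filter (fun e => e.1 == k)).map (fun e => e.2) = g :: t := by
    rcases List.mem_map.mp hkmem with ⟨e, he, rfl⟩
    have he' : e ∈ wanted := (List.mem_filter.mp he).1
    have : e.2 ∈ (wanted.filter (fun e' => e'.1 == e.1)).map (fun e => e.2) :=
      List.mem_map.mpr ⟨e, List.mem_filter.mpr ⟨he', by simp⟩, rfl⟩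
    rcases hl : (wanted.filter (fun e' => e'.1 == e.1)).map (fun e => e.2) with _ | ⟨g, t⟩
    · rw [hl] at this; simp at this
    · exact ⟨g, t, hl⟩
  have hred : (wanted.foldl pvStepA PySem.Dict.empty).get? k
      = some (g.1 || t.any (fun g => g.1), pvLastPre g.2 t) := by
    rw [pv_get?_foldl wanted k hkne, PySem.Dict.get?_empty, hgt]
    show pvRed (some g) t = _
    rw [pv_red_some]
  have hpre : pvGroupPre (g :: t) = pvLastPre g.2 t := by
    have h := pvLastPre_cons g.2 g t
    simp only [ite_self] at h
    rw [← h]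
    rfl
  rw [hgrp, hgt, PySem.Dict.getD_eq_get?_getD, hred, hpre]
  simp
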